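-- pv_equiv track=rewrite | github.com/nielsbijl/SM | FinalAssignment/RunMonteCarlo.py | add_score
-- ===== SOURCE A (Python) =====
-- def add_score(home, away, outcome, curr_score_dict, points=3):
--     """
--     Geeft het aangewezen team de bijbehorende punten
--
--     :param home: Thuis team
--     :param away: Uit team
--     :param outcome: Welk team gewonnen of gelijkspel
--     :param curr_score_dict: De huidige score van de pool (hoeveel punten elk team al heeft)
--     :param points: Hoeveel punten het winnende team krijgt (default 3, bij gelijk spel 1)
--     :return: De huidige score na het spelen van de match
--     """
--     if outcome == "Draw":
--         """Roept hier zichzelf aan en geeft beide teams 1 point"""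
--         curr_score_dict = add_score(home, away, home, curr_score_dict, 1)
--         curr_score_dict = add_score(home, away, away, curr_score_dict, 1)
--     else:
--         curr_score_dict[outcome] += points
--     return curr_score_dict
-- ===== SOURCE B (Python) =====
-- def add_score(home, away, outcome, curr_score_dict, points=3):
--     """Handle the draw case directly instead of via two recursive self-calls."""
--     if outcome == "Draw":
--         curr_score_dict[home] += 1
--         curr_score_dict[away] += 1
--     else:
--         curr_score_dict[outcome] += points
--     return curr_score_dict
-- ===== Notes on version B (the rewrite author's own statement) =====
-- stated objective: simpler
-- what changed: B replaces A's two recursive self-calls for the draw case with direct increments of both teams' scores, making the function non-recursive.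
import Mathlib
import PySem

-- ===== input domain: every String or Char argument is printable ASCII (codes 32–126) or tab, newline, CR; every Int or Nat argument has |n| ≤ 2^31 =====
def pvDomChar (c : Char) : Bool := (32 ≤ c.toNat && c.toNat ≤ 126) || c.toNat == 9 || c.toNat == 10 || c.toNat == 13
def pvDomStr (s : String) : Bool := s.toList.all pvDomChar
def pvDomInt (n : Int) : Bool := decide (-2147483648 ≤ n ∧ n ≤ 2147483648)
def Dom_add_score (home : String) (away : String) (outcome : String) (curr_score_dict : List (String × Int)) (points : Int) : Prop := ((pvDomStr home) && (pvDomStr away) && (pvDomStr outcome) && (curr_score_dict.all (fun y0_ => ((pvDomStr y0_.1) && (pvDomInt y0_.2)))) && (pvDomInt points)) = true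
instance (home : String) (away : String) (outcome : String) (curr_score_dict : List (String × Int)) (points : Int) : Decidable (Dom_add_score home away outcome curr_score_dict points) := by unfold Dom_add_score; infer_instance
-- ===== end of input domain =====

-- B removes A's two recursive self-calls for the draw case (objective: simpler).
-- Note: the Python A mutates curr_score_dict in place (so does B); the equivalence here is about the returned value.

-- ===== PORT A =====
-- A recurses on outcome = "Draw"; the fuel argument only makes that recursion total in Lean
-- (fuel 2 is never exhausted on inputs admitted by Pre_, where the recursion depth is at most 1).
def add_score_go (fuel : Nat) (home : String) (away : String) (outcome : String) (curr_score_dict : List (String × Int)) (points : Int) : List (String × Int) :=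
  match fuel with
  | 0 => curr_score_dict
  | fuel + 1 =>
    if outcome = "Draw" then
      -- curr_score_dict = add_score(home, away, home, curr_score_dict, 1)
      -- curr_score_dict = add_score(home, away, away, curr_score_dict, 1)
      let d1 := add_score_go fuel home away home curr_score_dict 1
      add_score_go fuel home away away d1 1
    else
      -- curr_score_dict[outcome] += points  (KeyError when outcome is absent: excluded by Pre_)
      match (PySem.Dict.mk curr_score_dict).get? outcome with
      | some v => ((PySem.Dict.mk curr_score_dict).insert outcome (v + points)).items
      | none => curr_score_dict

def add_score (home : String) (away : String) (outcome : String) (curr_score_dict : List (String × Int)) (points : Int) : List (String × Int) :=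
  add_score_go 2 home away outcome curr_score_dict points

-- ===== PORT B =====
-- curr_score_dict[team] += pts  (KeyError when team is absent: excluded by Pre_)
def pyBump (d : List (String × Int)) (team : String) (pts : Int) : List (String × Int) :=
  match (PySem.Dict.mk d).get? team with
  | some v => ((PySem.Dict.mk d).insert team (v + pts)).items
  | none => d

def add_score_alt (home : String) (away : String) (outcome : String) (curr_score_dict : List (String × Int)) (points : Int) : List (String × Int) :=
  if outcome = "Draw" then
    pyBump (pyBump curr_score_dict home 1) away 1
  else
    pyBump curr_score_dict outcome points

-- ===== PRECONDITION & SPEC =====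
-- Pre_ excludes exactly the inputs where Python A does not return normally: a KeyError when the
-- team to be credited is missing from the dict, and infinite recursion (RecursionError) when
-- outcome is "Draw" and home or away is itself the string "Draw".
def Pre_add_score (home : String) (away : String) (outcome : String) (curr_score_dict : List (String × Int)) (points : Int) : Prop :=
  if outcome = "Draw" then
    home ≠ "Draw" ∧ away ≠ "Draw" ∧
    ((PySem.Dict.mk curr_score_dict).get? home).isSome = true ∧
    ((PySem.Dict.mk curr_score_dict).get? away).isSome = true
  else
    ((PySem.Dict.mk curr_score_dict).get? outcome).isSome = true
instance (home : String) (away : String) (outcome : String) (curr_score_dict : List (String × Int)) (points : Int) : Decidable (Pre_add_score home away outcome curr_score_dict points) := by unfold Pre_add_score; infer_instance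

def pvWitness_add_score : String × String × String × (List (String × Int)) × Int := ("Ajax", "PSV", "Draw", [("Ajax", 4), ("PSV", 7)], 3)

def Spec_add_score (home : String) (away : String) (outcome : String) (curr_score_dict : List (String × Int)) (points : Int) (out : List (String × Int)) : Prop := out = add_score_alt home away outcome curr_score_dict points
instance (home : String) (away : String) (outcome : String) (curr_score_dict : List (String × Int)) (points : Int) (out : List (String × Int)) : Decidable (Spec_add_score home away outcome curr_score_dict points out) := by unfold Spec_add_score; infer_instance

-- ===== CLAIM (what is proved, stated in full; the proofs are below) =====
def Claim_equal_add_score : Prop := ∀ (home : String) (away : String) (outcome : String) (curr_score_dict : List (String × Int)) (points : Int), Dom_add_score home away outcome curr_score_dict points → Pre_add_score home away outcome curr_score_dict points → Spec_add_score home away outcome curr_score_dict points (add_score home away outcome curr_score_dict points)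

-- ===== LEMMAS AND PROOFS =====

-- ===== VERDICT (by name: the statement is the Claim_ definition above) =====
theorem add_score_spec : Claim_equal_add_score := by
  intro home away outcome d p _ hpre
  unfold Spec_add_score add_score add_score_alt
  by_cases ho : outcome = "Draw"
  · rw [Pre_add_score, if_pos ho] at hpre
    obtain ⟨hh, ha, _, _⟩ := hpre
    simp only [add_score_go, if_pos ho]
    simp [pyBump, hh, ha]
  · rw [Pre_add_score, if_neg ho] at hpre
    simp [add_score_go, pyBump, ho]
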